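-- pv_equiv track=rewrite | github.com/mvillalva/python.unsam | ejercicios/Clase05/envido (2).py | tengo_31
-- ===== SOURCE A (Python) =====
-- palos = ['oro', 'copa', 'espada', 'basto']
--
-- def tengo_31(mano):
--     ten = False
--     for palo in palos:
--         if (4, palo) in mano and (7, palo) in mano:
--             ten = True
--         if (5, palo) in mano and (6, palo) in mano:
--             ten = True
--     return ten
-- ===== SOURCE B (Python) =====
-- palos = ['oro', 'copa', 'espada', 'basto']
--
-- def tengo_31(mano):
--     # Index the hand once: suit -> set of numbers present (only well-formed
--     # (number, suit) 2-tuples are indexed; other elements are ignored, as A's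
--     # membership tests never match them). Then scan the index.
--     by_suit = {}
--     for card in mano:
--         if isinstance(card, tuple) and len(card) == 2:
--             n, s = card
--             by_suit.setdefault(s, set()).add(n)
--     return any(s in palos and ({4, 7} <= nums or {5, 6} <= nums)
--                for s, nums in by_suit.items())
-- ===== Notes on version B (the rewrite author's own statement) =====
-- stated objective: alternative
-- what changed: B builds a suit->numbers index of the hand in one pass and scans that index for a suit holding {4,7} or {5,6}, instead of A's probing the hand with four membership tests per fixed suit.
import Mathlib
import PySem

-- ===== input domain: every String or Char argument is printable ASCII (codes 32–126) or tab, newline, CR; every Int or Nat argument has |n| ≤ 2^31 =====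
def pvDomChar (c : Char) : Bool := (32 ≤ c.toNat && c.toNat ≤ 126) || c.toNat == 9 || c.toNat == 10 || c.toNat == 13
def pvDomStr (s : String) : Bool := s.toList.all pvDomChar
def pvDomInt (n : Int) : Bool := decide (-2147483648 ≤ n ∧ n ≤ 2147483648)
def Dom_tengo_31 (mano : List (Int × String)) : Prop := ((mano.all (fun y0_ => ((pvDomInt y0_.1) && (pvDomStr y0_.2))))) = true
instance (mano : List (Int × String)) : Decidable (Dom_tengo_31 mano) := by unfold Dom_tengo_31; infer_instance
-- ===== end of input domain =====

-- B builds a suit→numbers index of the hand in one pass and scans it, instead of A's four fixed membership probes per suit; alternative decomposition, same behaviour.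


-- ===== PORT A =====
def palos : List String := ["oro", "copa", "espada", "basto"]

def tengo_31 (mano : List (Int × String)) : Bool :=
  palos.foldl (fun ten palo =>
    let ten := if mano.contains ((4 : Int), palo) && mano.contains ((7 : Int), palo) then true else ten
    if mano.contains ((5 : Int), palo) && mano.contains ((6 : Int), palo) then true else ten) false

-- ===== PORT B =====
-- the isinstance/len-2 guard of Source B is vacuously true on the typed input List (Int × String)
def tengo_31_alt (mano : List (Int × String)) : Bool :=
  (mano.foldl (fun d card => d.modify card.2 [] (fun s => PySem.Set.add s card.1))
      (PySem.Dict.empty : PySem.Dict String (PySem.Set Int))).items.any (fun kv =>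
    palos.contains kv.1 &&
      ((kv.2.contains (4 : Int) && kv.2.contains (7 : Int)) ||
       (kv.2.contains (5 : Int) && kv.2.contains (6 : Int))))

-- ===== PRECONDITION & SPEC =====
def Spec_tengo_31 (mano : List (Int × String)) (out : Bool) : Prop := out = tengo_31_alt mano
instance (mano : List (Int × String)) (out : Bool) : Decidable (Spec_tengo_31 mano out) := by unfold Spec_tengo_31; infer_instance

-- ===== CLAIM (what is proved, stated in full; the proofs are below) =====
def Claim_equal_tengo_31 : Prop := ∀ (mano : List (Int × String)), Dom_tengo_31 mano → Spec_tengo_31 mano (tengo_31 mano)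

-- ===== LEMMAS AND PROOFS =====

def pvChk (mano : List (Int × String)) (p : String) : Bool :=
  (mano.contains ((4 : Int), p) && mano.contains ((7 : Int), p)) ||
  (mano.contains ((5 : Int), p) && mano.contains ((6 : Int), p))

-- A's loop over the four concrete suits is an any over them
theorem pvA_eq (mano : List (Int × String)) : tengo_31 mano = palos.any (pvChk mano) := by
  simp only [tengo_31, palos, pvChk, List.foldl_cons, List.foldl_nil, List.any_cons, List.any_nil]
  generalize mano.contains ((4 : Int), "oro") = a1
  generalize mano.contains ((7 : Int), "oro") = a2
  generalize mano.contains ((5 : Int), "oro") = a3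
  generalize mano.contains ((6 : Int), "oro") = a4
  generalize mano.contains ((4 : Int), "copa") = b1
  generalize mano.contains ((7 : Int), "copa") = b2
  generalize mano.contains ((5 : Int), "copa") = b3
  generalize mano.contains ((6 : Int), "copa") = b4
  generalize mano.contains ((4 : Int), "espada") = c1
  generalize mano.contains ((7 : Int), "espada") = c2
  generalize mano.contains ((5 : Int), "espada") = c3
  generalize mano.contains ((6 : Int), "espada") = c4
  generalize mano.contains ((4 : Int), "basto") = d1
  generalize mano.contains ((7 : Int), "basto") = d2
  generalize mano.contains ((5 : Int), "basto") = d3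
  generalize mano.contains ((6 : Int), "basto") = d4
  revert a1 a2 a3 a4 b1 b2 b3 b4 c1 c2 c3 c4 d1 d2 d3 d4
  decide

-- the grouping fold: number-membership of each suit's set in the built index
theorem pvGetD_contains (l : List (Int × String)) :
    ∀ (d : PySem.Dict String (PySem.Set Int)) (s : String) (n : Int),
      ((l.foldl (fun d card => d.modify card.2 [] (fun t => PySem.Set.add t card.1)) d).getD s []).contains n
        = (((d.getD s []).contains n) || l.contains (n, s)) := by
  induction l with
  | nil => simp
  | cons c cs ih =>
      intro d s n
      simp only [List.foldl_cons, ih]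
      rw [PySem.Dict.getD_modify]
      by_cases h : s = c.2
      · subst h
        rw [if_pos rfl, Bool.eq_iff_iff]
        simp [PySem.Set.mem_add, Prod.ext_iff]
        tauto
      · rw [if_neg h, Bool.eq_iff_iff]
        simp [Prod.ext_iff, fun h2 : _ = c.2 => h h2]

theorem pvB_eq_true_iff (mano : List (Int × String)) :
    tengo_31_alt mano = true ↔ ∃ s ∈ mano.map Prod.snd, s ∈ palos ∧ pvChk mano s = true := by
  unfold tengo_31_alt
  have hnd : ((mano.foldl (fun d card => d.modify card.2 [] (fun t => PySem.Set.add t card.1))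
      PySem.Dict.empty)).keys.Nodup :=
    PySem.Dict.nodup_keys_foldl_modify_key mano Prod.snd [] (fun _ card t => PySem.Set.add t card.1)
      PySem.Dict.empty (by simp)
  have hkeys : ((mano.foldl (fun d card => d.modify card.2 [] (fun t => PySem.Set.add t card.1))
      PySem.Dict.empty)).keys = PySem.Set.ofList (mano.map Prod.snd) := by
    rw [PySem.Dict.keys_foldl_modify_key mano Prod.snd [] (fun _ card t => PySem.Set.add t card.1)
      PySem.Dict.empty, PySem.Set.ofList_eq_foldl]
    rfl
  rw [PySem.Dict.items_eq_map_keys _ hnd [], hkeys]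
  simp only [List.any_map, List.any_eq_true, Function.comp, Bool.and_eq_true, Bool.or_eq_true]
  constructor
  · rintro ⟨k, hk, hpk, hg⟩
    refine ⟨k, ?_, by simpa using hpk, ?_⟩
    · simpa using (PySem.Set.mem_ofList _ _).mp hk
    · unfold pvChk
      have h4 := pvGetD_contains mano PySem.Dict.empty k 4
      have h7 := pvGetD_contains mano PySem.Dict.empty k 7
      have h5 := pvGetD_contains mano PySem.Dict.empty k 5
      have h6 := pvGetD_contains mano PySem.Dict.empty k 6
      simp only [PySem.Dict.getD_empty] at h4 h7 h5 h6
      simp only [Bool.and_eq_true, Bool.or_eq_true] at hg ⊢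
      rw [h4, h7, h5, h6] at hg
      simpa using hg
  · rintro ⟨s, hs, hp, hc⟩
    refine ⟨s, (PySem.Set.mem_ofList _ _).mpr hs, by simpa using hp, ?_⟩
    unfold pvChk at hc
    have h4 := pvGetD_contains mano PySem.Dict.empty s 4
    have h7 := pvGetD_contains mano PySem.Dict.empty s 7
    have h5 := pvGetD_contains mano PySem.Dict.empty s 5
    have h6 := pvGetD_contains mano PySem.Dict.empty s 6
    simp only [PySem.Dict.getD_empty] at h4 h7 h5 h6
    simp only [Bool.and_eq_true, Bool.or_eq_true] at hc ⊢
    rw [h4, h7, h5, h6]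
    simpa using hc

theorem pvA_eq_true_iff (mano : List (Int × String)) :
    tengo_31 mano = true ↔ ∃ s ∈ mano.map Prod.snd, s ∈ palos ∧ pvChk mano s = true := by
  rw [pvA_eq, List.any_eq_true]
  constructor
  · rintro ⟨p, hp, hc⟩
    refine ⟨p, ?_, hp, hc⟩
    unfold pvChk at hc
    simp only [Bool.or_eq_true, Bool.and_eq_true, List.contains_eq_mem, decide_eq_true_eq] at hc
    rcases hc with ⟨h, _⟩ | ⟨h, _⟩ <;> exact List.mem_map.mpr ⟨_, h, rfl⟩
  · rintro ⟨s, _, hp, hc⟩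
    exact ⟨s, hp, hc⟩

-- ===== VERDICT (by name: the statement is the Claim_ definition above) =====
theorem tengo_31_spec : Claim_equal_tengo_31 := by
  intro mano _
  unfold Spec_tengo_31
  rw [Bool.eq_iff_iff, pvA_eq_true_iff, pvB_eq_true_iff]
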